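-- pv_equiv track=rewrite | github.com/Harish1792/Text-Psyche | Text/filePrediction.py | find_matching_words2
-- ===== SOURCE A (Python) =====
-- def find_matching_words2(edited_data,main_list):
--     categList = []
--     print ("In Matching Words")
--     tmpList = edited_data
--     oneRow= []
--     for wordList in main_list:
--         match = [x for x in tmpList if x in wordList]
--         #oneRow.append(len(set(tmpList)&set(wordList)))
--         oneRow.append(len(match))
--         #print (len(match))
--     categList.append(oneRow)
--     return categList
-- ===== SOURCE B (Python) =====
-- def find_matching_words2(edited_data, main_list):
--     print("In Matching Words")
--     cnt = {}
--     for x in edited_data: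
--         cnt[x] = cnt.get(x, 0) + 1
--     return [[sum(cnt.get(w, 0) for w in set(wordList)) for wordList in main_list]]
-- ===== Notes on version B (the rewrite author's own statement) =====
-- stated objective: faster
-- what changed: B builds a frequency dict of edited_data once and produces the row as a list comprehension summing those counts over the distinct words of each wordList, instead of filtering edited_data by membership in each wordList inside an accumulator loop.
import Mathlib
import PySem

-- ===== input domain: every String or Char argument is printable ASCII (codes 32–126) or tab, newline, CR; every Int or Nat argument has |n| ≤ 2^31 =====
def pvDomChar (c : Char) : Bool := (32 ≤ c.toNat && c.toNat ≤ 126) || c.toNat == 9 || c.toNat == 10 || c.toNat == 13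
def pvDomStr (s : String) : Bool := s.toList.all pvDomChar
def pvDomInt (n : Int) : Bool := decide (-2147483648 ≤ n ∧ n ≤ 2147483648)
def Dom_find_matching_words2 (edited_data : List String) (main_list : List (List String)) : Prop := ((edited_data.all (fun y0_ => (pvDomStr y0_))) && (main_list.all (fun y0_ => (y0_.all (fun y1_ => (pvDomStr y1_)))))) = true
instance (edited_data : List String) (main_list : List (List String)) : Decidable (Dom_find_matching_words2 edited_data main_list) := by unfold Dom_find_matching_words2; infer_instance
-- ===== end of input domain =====

-- B builds a frequency dict of edited_data once and produces the row as a comprehension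
-- summing those counts over each wordList's distinct words (objective: faster, asymptotic).
-- The print statement is side-effect only and is not modelled.

-- ===== PORT A =====
def find_matching_words2 (edited_data : List String) (main_list : List (List String)) : List (List Int) :=
  -- categList = []; tmpList = edited_data; oneRow = []
  let tmpList := edited_data
  let oneRow : List Int :=
    main_list.foldl (fun row wordList =>
      -- match = [x for x in tmpList if x in wordList]; oneRow.append(len(match))
      row ++ [((tmpList.filter (fun x => wordList.contains x)).length : Int)]) []
  [oneRow]

-- ===== PORT B =====
def find_matching_words2_alt (edited_data : List String) (main_list : List (List String)) : List (List Int) :=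
  -- cnt = {}; for x in edited_data: cnt[x] = cnt.get(x, 0) + 1
  let cnt : PySem.Dict String Int :=
    edited_data.foldl (fun d x => d.modify x 0 (· + 1)) PySem.Dict.empty
  -- return [[sum(cnt.get(w, 0) for w in set(wordList)) for wordList in main_list]]
  [main_list.map (fun wordList =>
    ((PySem.Set.ofList wordList).map (fun w => cnt.getD w 0)).sum)]

-- ===== PRECONDITION & SPEC =====
def Spec_find_matching_words2 (edited_data : List String) (main_list : List (List String)) (out : List (List Int)) : Prop := out = find_matching_words2_alt edited_data main_list
instance (edited_data : List String) (main_list : List (List String)) (out : List (List Int)) : Decidable (Spec_find_matching_words2 edited_data main_list out) := by unfold Spec_find_matching_words2; infer_instance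

-- ===== CLAIM (what is proved, stated in full; the proofs are below) =====
def Claim_equal_find_matching_words2 : Prop := ∀ (edited_data : List String) (main_list : List (List String)), Dom_find_matching_words2 edited_data main_list → Spec_find_matching_words2 edited_data main_list (find_matching_words2 edited_data main_list)

-- ===== LEMMAS AND PROOFS =====

-- adding one element in front of l adds 1 to the count-sum over a Nodup index list S iff x ∈ S
theorem pv_sum_count_cons (S : List String) (l : List String) (x : String) (hS : S.Nodup) :
    (S.map (fun w => (((x :: l).count w : Nat) : Int))).sum
      = (S.map (fun w => ((l.count w : Nat) : Int))).sum + (if x ∈ S then 1 else 0) := by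
  induction S with
  | nil => simp
  | cons s S ih =>
    rcases List.nodup_cons.mp hS with ⟨hs, hS'⟩
    simp only [List.map_cons, List.sum_cons, ih hS']
    have hcnt : (((x :: l).count s : Nat) : Int) = ((l.count s : Nat) : Int) + (if x = s then 1 else 0) := by
      rcases eq_or_ne x s with h | h
      · subst h; simp
      · simp [h]
    rw [hcnt]
    by_cases hxs : x = s
    · subst hxs
      simp [hs]
      ring
    · simp [hxs]
      split_ifs <;> ring

-- the filtered length over l equals the count-sum over the distinct words of wl
theorem pv_filter_eq_sum (l wl : List String) :
    (((l.filter (fun x => wl.contains x)).length : Nat) : Int)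
      = ((PySem.Set.ofList wl).map (fun w => ((l.count w : Nat) : Int))).sum := by
  induction l with
  | nil => simp
  | cons x l ih =>
    rw [pv_sum_count_cons _ _ _ (PySem.Set.nodup_ofList wl)]
    by_cases hx : x ∈ wl
    · have hm : x ∈ PySem.Set.ofList wl := by
        rw [PySem.Set.mem_ofList]; exact hx
      simp [hx, hm, ← ih]
    · have hm : x ∉ PySem.Set.ofList wl := by
        rw [PySem.Set.mem_ofList]; exact hx
      simp [hx, hm, ← ih]

-- A's append-accumulator loop over main_list produces exactly the map of the per-wordList value
theorem pv_foldl_append_eq_map (f : List String → Int) (ml : List (List String)) (acc : List Int) :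
    ml.foldl (fun row wl => row ++ [f wl]) acc = acc ++ ml.map f := by
  induction ml generalizing acc with
  | nil => simp
  | cons wl ml ih => simp [ih]

-- ===== VERDICT (by name: the statement is the Claim_ definition above) =====
theorem find_matching_words2_spec : Claim_equal_find_matching_words2 := by
  intro edited_data main_list hdom
  clear hdom
  unfold Spec_find_matching_words2 find_matching_words2 find_matching_words2_alt
  simp only [List.cons.injEq, and_true]
  rw [pv_foldl_append_eq_map (fun wl => ((edited_data.filter (fun x => wl.contains x)).length : Int)) main_list []]
  have hcnt : ∀ w : String,
      (edited_data.foldl (fun d x => d.modify x 0 (· + 1)) PySem.Dict.empty).getD w 0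
        = ((edited_data.count w : Nat) : Int) := by
    intro w
    rw [PySem.Dict.getD_foldl_modify_add_one]
    simp
  simp only [List.nil_append]
  apply List.map_congr_left
  intro wl _
  rw [pv_filter_eq_sum edited_data wl]
  simp only [hcnt]
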